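-- pv_equiv track=rewrite | github.com/Lautiim/ayed1-2025-tps | TP3/Ejercicio_02.py | matriz_e
-- ===== SOURCE A (Python) =====
-- def matriz_e(n: int) -> list[list[int]]:
--     """
--     Genera matriz con numeros consecutivos en posiciones de paridad impar.
--
--     Pre: n > 0.
--
--     Post: celdas donde (i+j)%2==1 reciben 1..k; resto 0.
--     """
--     m = [[0] * n for _ in range(n)]
--     num = 1
--     for i in range(n):
--         for j in range(n):
--             if (i + j) % 2 == 1:
--                 m[i][j] = num
--                 num += 1
--     return m
-- ===== SOURCE B (Python) =====
-- def matriz_e(n: int) -> list[list[int]]: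
--     """Closed-form fill: each odd-parity cell's number is computed directly
--     from (i, j, n) instead of threading a running counter through the scan."""
--     return [
--         [1 + (i * n) // 2 + (i % 2 + j) // 2 if (i + j) % 2 == 1 else 0
--          for j in range(n)]
--         for i in range(n)
--     ]
-- ===== Notes on version B (the rewrite author's own statement) =====
-- stated objective: alternative
-- what changed: B drops A's running counter threaded through the nested mutation loop and instead computes each odd-parity cell's number independently by a closed form (odd cells in the rows above plus odd cells earlier in its own row), building the matrix directly with a nested comprehension instead of mutating a pre-built zero matrix.
import Mathlib
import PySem

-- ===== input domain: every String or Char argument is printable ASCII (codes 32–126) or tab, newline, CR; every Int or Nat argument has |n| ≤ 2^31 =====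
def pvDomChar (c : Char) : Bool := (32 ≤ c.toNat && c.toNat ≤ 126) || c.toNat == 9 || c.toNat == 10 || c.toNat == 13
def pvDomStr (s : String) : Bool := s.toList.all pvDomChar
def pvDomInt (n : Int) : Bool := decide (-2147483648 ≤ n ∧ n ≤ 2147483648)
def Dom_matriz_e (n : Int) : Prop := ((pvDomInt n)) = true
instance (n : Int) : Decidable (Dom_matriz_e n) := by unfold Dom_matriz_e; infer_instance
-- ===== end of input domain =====

-- B replaces A's running counter by a closed-form value for each odd-parity cell (alternative decomposition, same cost).

-- ===== PORT A =====
def matriz_e (n : Int) : List (List Int) :=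
  let m0 := (PySem.List.pyRange 0 n 1).map (fun _ => List.replicate n.toNat (0 : Int))
  let st := (PySem.List.pyRange 0 n 1).foldl (fun (st : List (List Int) × Int) i =>
      (PySem.List.pyRange 0 n 1).foldl (fun (st2 : List (List Int) × Int) j =>
        if PySem.Int.mod (i + j) 2 = 1 then
          (PySem.List.pySetD st2.1 i (PySem.List.pySetD (PySem.List.pyGetD st2.1 i []) j st2.2), st2.2 + 1)
        else st2) st) (m0, 1)
  st.1

-- ===== PORT B =====
def matriz_e_alt (n : Int) : List (List Int) :=
  (PySem.List.pyRange 0 n 1).map (fun i =>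
    (PySem.List.pyRange 0 n 1).map (fun j =>
      if PySem.Int.mod (i + j) 2 = 1 then
        1 + PySem.Int.floordiv (i * n) 2 + PySem.Int.floordiv (PySem.Int.mod i 2 + j) 2
      else 0))

-- ===== PRECONDITION & SPEC =====
def Spec_matriz_e (n : Int) (out : List (List Int)) : Prop := out = matriz_e_alt n
instance (n : Int) (out : List (List Int)) : Decidable (Spec_matriz_e n out) := by unfold Spec_matriz_e; infer_instance

-- ===== CLAIM (what is proved, stated in full; the proofs are below) =====
def Claim_equal_matriz_e : Prop := ∀ (n : Int), Dom_matriz_e n → Spec_matriz_e n (matriz_e n)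

-- ===== LEMMAS AND PROOFS =====

-- the final content of row i of B's matrix, Nat-indexed
def pvRowB (N i : Nat) : List Int :=
  (List.range N).map (fun (k : Nat) =>
    if PySem.Int.mod ((i : Int) + (k : Int)) 2 = 1 then
      1 + PySem.Int.floordiv ((i : Int) * (N : Int)) 2
        + PySem.Int.floordiv (PySem.Int.mod (i : Int) 2 + (k : Int)) 2
    else 0)

lemma pv_set_map_range {α : Type} (N b : Nat) (hb : b < N) (f : Nat → α) (v : α) :
    ((List.range N).map f).set b v = (List.range N).map (fun k => if k = b then v else f k) := by
  apply List.ext_getElem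
  · simp
  · intro k h1 h2
    simp only [List.length_map, List.length_range] at h2
    by_cases hk : k = b
    · subst hk
      simp [List.getElem_set_self, List.getElem_map, List.getElem_range]
    · simp only [List.getElem_set, List.getElem_map, List.getElem_range]
      rw [if_neg (fun h : b = k => hk h.symm), if_neg hk]

lemma pv_map_const_replicate {α β : Type} (l : List β) (a : α) :
    l.map (fun _ => a) = List.replicate l.length a := by
  induction l with
  | nil => rfl
  | cons x xs ih => simp [List.replicate_succ, ih]

-- counter increment per row, in Nat
lemma pv_cnt_step (b Nn : Nat) : (b * Nn) / 2 + (b % 2 + Nn) / 2 = ((b + 1) * Nn) / 2 := by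
  rcases Nat.even_or_odd b with ⟨q, hq⟩ | ⟨q, hq⟩ <;> subst hq
  · have h1 : (q + q) * Nn = q * Nn + q * Nn := by ring
    have h2 : (q + q + 1) * Nn = q * Nn + q * Nn + Nn := by ring
    rw [h1, h2]; omega
  · have h1 : (2 * q + 1) * Nn = q * Nn + q * Nn + Nn := by ring
    have h2 : (2 * q + 1 + 1) * Nn = q * Nn + q * Nn + Nn + Nn := by ring
    rw [h1, h2]; omega

lemma pv_mod2 (m : Nat) : PySem.Int.mod (m : Int) 2 = ((m % 2 : Nat) : Int) := by
  exact_mod_cast PySem.Int.mod_natCast m 2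

lemma pv_div2 (m : Nat) : PySem.Int.floordiv (m : Int) 2 = ((m / 2 : Nat) : Int) := by
  exact_mod_cast PySem.Int.floordiv_natCast m 2

-- the inner row loop, characterized by induction from the right
lemma pv_row_loop (i : Nat) (c : Int) (N b : Nat) (hb : b ≤ N) :
    (PySem.List.pyRange 0 (b : Int) 1).foldl
      (fun (rc : List Int × Int) j =>
        if PySem.Int.mod ((i : Int) + j) 2 = 1 then (PySem.List.pySetD rc.1 j rc.2, rc.2 + 1) else rc)
      (List.replicate N (0 : Int), c)
    = ((List.range N).map (fun k =>
          if k < b ∧ PySem.Int.mod ((i : Int) + (k : Int)) 2 = 1 then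
            c + PySem.Int.floordiv (PySem.Int.mod (i : Int) 2 + (k : Int)) 2
          else 0),
       c + PySem.Int.floordiv (PySem.Int.mod (i : Int) 2 + (b : Int)) 2) := by
  induction b with
  | zero =>
      simp only [Nat.cast_zero]
      rw [PySem.List.pyRange_one_eq_nil (le_refl 0)]
      simp only [List.foldl_nil, add_zero, Prod.mk.injEq]
      constructor
      · rw [show (fun (k : Nat) => if k < 0 ∧ PySem.Int.mod ((i : Int) + (k : Int)) 2 = 1 then
            c + PySem.Int.floordiv (PySem.Int.mod (i : Int) 2 + (k : Int)) 2 else 0)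
            = (fun (_ : Nat) => (0 : Int)) from funext (fun k => by simp)]
        rw [pv_map_const_replicate, List.length_range]
      · rw [pv_mod2 i, pv_div2 (i % 2)]
        have h0 : i % 2 / 2 = 0 := by omega
        simp [h0]
  | succ b ih =>
      have hb' : b ≤ N := Nat.le_of_succ_le hb
      have hbc : (0 : Int) ≤ (b : Int) := Int.natCast_nonneg b
      rw [show ((b + 1 : Nat) : Int) = (b : Int) + 1 by push_cast; ring,
          PySem.List.pyRange_one_succ_right hbc, List.foldl_append, ih hb']
      simp only [List.foldl_cons, List.foldl_nil]
      have hcast : (i : Int) + (b : Int) = ((i + b : Nat) : Int) := by push_cast; ring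
      have hcast2 : PySem.Int.mod (i : Int) 2 + (b : Int) = ((i % 2 + b : Nat) : Int) := by
        rw [pv_mod2 i]; push_cast; ring
      have hcast3 : PySem.Int.mod (i : Int) 2 + ((b : Int) + 1) = ((i % 2 + b + 1 : Nat) : Int) := by
        rw [pv_mod2 i]; push_cast; ring
      by_cases hcond : PySem.Int.mod ((i : Int) + (b : Int)) 2 = 1
      · have hparity : (i + b) % 2 = 1 := by
          have h := hcond
          rw [hcast, pv_mod2 (i + b)] at h
          exact_mod_cast h
        simp only [hcond, if_pos, Prod.mk.injEq]
        constructor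
        · rw [PySem.List.pySetD_natCast, pv_set_map_range N b (by omega)]
          apply List.map_congr_left
          intro k hk
          by_cases hkb : k = b
          · subst hkb
            rw [if_pos rfl, if_pos (And.intro (Nat.lt_succ_self k) hcond)]
          · simp only [if_neg hkb]
            have hiff : (k < b + 1 ∧ PySem.Int.mod ((i : Int) + (k : Int)) 2 = 1)
                 ↔ (k < b ∧ PySem.Int.mod ((i : Int) + (k : Int)) 2 = 1) := by
              constructor <;> rintro ⟨h1, h2⟩ <;> exact ⟨by omega, h2⟩
            simp only [hiff]
        · rw [hcast2, hcast3, pv_div2, pv_div2]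
          have h : (i % 2 + b) / 2 + 1 = (i % 2 + b + 1) / 2 := by omega
          rw [add_assoc, ← h]
          push_cast
          ring
      · have hparity : (i + b) % 2 = 0 := by
          by_contra h
          apply hcond
          rw [hcast, pv_mod2 (i + b)]
          have h1 : (i + b) % 2 = 1 := by omega
          exact_mod_cast h1
        simp only [hcond, if_false, Prod.mk.injEq]
        constructor
        · apply List.map_congr_left
          intro k hk
          by_cases hkb : k = b
          · subst hkb
            rw [if_neg (fun h => absurd h.1 (lt_irrefl k)),
                if_neg (fun h => hcond h.2)]
          · have hiff : (k < b + 1 ∧ PySem.Int.mod ((i : Int) + (k : Int)) 2 = 1)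
                 ↔ (k < b ∧ PySem.Int.mod ((i : Int) + (k : Int)) 2 = 1) := by
              constructor <;> rintro ⟨h1, h2⟩
              · exact ⟨by omega, h2⟩
              · exact ⟨by omega, h2⟩
            simp only [hiff]
        · rw [hcast2, hcast3, pv_div2, pv_div2]
          have h : (i % 2 + b) / 2 = (i % 2 + b + 1) / 2 := by omega
          rw [h]

-- the matrix-level inner fold only touches row i: it is row-level fold + one set
lemma pv_lift (i : Nat) (js : List Int) (m : List (List Int)) (c : Int) (hlen : i < m.length) :
    js.foldl (fun (st2 : List (List Int) × Int) j =>
        if PySem.Int.mod ((i : Int) + j) 2 = 1 then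
          (PySem.List.pySetD st2.1 (i : Int) (PySem.List.pySetD (PySem.List.pyGetD st2.1 (i : Int) []) j st2.2), st2.2 + 1)
        else st2) (m, c)
    = (PySem.List.pySetD m (i : Int)
         ((js.foldl (fun (rc : List Int × Int) j =>
             if PySem.Int.mod ((i : Int) + j) 2 = 1 then (PySem.List.pySetD rc.1 j rc.2, rc.2 + 1) else rc)
           (PySem.List.pyGetD m (i : Int) [], c)).1),
       (js.foldl (fun (rc : List Int × Int) j =>
             if PySem.Int.mod ((i : Int) + j) 2 = 1 then (PySem.List.pySetD rc.1 j rc.2, rc.2 + 1) else rc)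
           (PySem.List.pyGetD m (i : Int) [], c)).2) := by
  induction js generalizing m c with
  | nil =>
      simp only [List.foldl_nil]
      rw [PySem.List.pySetD_natCast, PySem.List.pyGetD_natCast,
          List.getD_eq_getElem m [] hlen, List.set_getElem_self]
  | cons j rest ih =>
      simp only [List.foldl_cons]
      by_cases hcond : PySem.Int.mod ((i : Int) + j) 2 = 1
      · simp only [hcond, if_pos]
        rw [ih _ _ (by rw [PySem.List.length_pySetD]; exact hlen)]
        rw [PySem.List.pySetD_natCast, PySem.List.pySetD_natCast,
            PySem.List.pyGetD_natCast (m.set i _),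
            List.getD_eq_getElem _ _ (by simpa using hlen), List.getElem_set_self,
            List.set_set, PySem.List.pySetD_natCast]
      · simp only [hcond, if_false]
        exact ih m c hlen

-- the outer loop invariant: after b rows, rows [0,b) are final and the counter is 1 + (b*N)/2
lemma pv_outer_loop (N b : Nat) (hb : b ≤ N) :
    (PySem.List.pyRange 0 (b : Int) 1).foldl
      (fun (st : List (List Int) × Int) i =>
        (PySem.List.pyRange 0 (N : Int) 1).foldl
          (fun (st2 : List (List Int) × Int) j =>
            if PySem.Int.mod (i + j) 2 = 1 then
              (PySem.List.pySetD st2.1 i (PySem.List.pySetD (PySem.List.pyGetD st2.1 i []) j st2.2), st2.2 + 1)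
            else st2) st)
      (List.replicate N (List.replicate N (0 : Int)), 1)
    = ((List.range N).map (fun i => if i < b then pvRowB N i else List.replicate N 0),
       1 + PySem.Int.floordiv ((b : Int) * (N : Int)) 2) := by
  induction b with
  | zero =>
      simp only [Nat.cast_zero]
      rw [PySem.List.pyRange_one_eq_nil (le_refl 0), List.foldl_nil]
      have e1 : (0 : Int) * (N : Int) = ((0 : Nat) : Int) := by push_cast; ring
      rw [e1, pv_div2]
      have e2 : (fun i => if i < 0 then pvRowB N i else List.replicate N (0 : Int))
              = (fun (_ : Nat) => List.replicate N (0 : Int)) :=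
        funext (fun i => by simp)
      rw [e2, pv_map_const_replicate, List.length_range]
      simp
  | succ b ih =>
      have hb' : b ≤ N := Nat.le_of_succ_le hb
      have hbN : b < N := hb
      have hbc : (0 : Int) ≤ (b : Int) := Int.natCast_nonneg b
      rw [show ((b + 1 : Nat) : Int) = (b : Int) + 1 by push_cast; ring,
          PySem.List.pyRange_one_succ_right hbc, List.foldl_append, ih hb']
      simp only [List.foldl_cons, List.foldl_nil]
      have hlenM : b < ((List.range N).map
          (fun i => if i < b then pvRowB N i else List.replicate N (0 : Int))).length := by
        simp [hbN]
      rw [pv_lift b _ _ _ hlenM]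
      have hget : PySem.List.pyGetD ((List.range N).map
            (fun i => if i < b then pvRowB N i else List.replicate N (0 : Int))) (b : Int) []
          = List.replicate N (0 : Int) := by
        rw [PySem.List.pyGetD_natCast, List.getD_eq_getElem _ _ (by simpa using hbN)]
        simp
      rw [hget, pv_row_loop b _ N N (le_refl N)]
      have hrow : (List.range N).map (fun k =>
            if k < N ∧ PySem.Int.mod ((b : Int) + (k : Int)) 2 = 1 then
              1 + PySem.Int.floordiv ((b : Int) * (N : Int)) 2
                + PySem.Int.floordiv (PySem.Int.mod (b : Int) 2 + (k : Int)) 2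
            else 0)
          = pvRowB N b := by
        unfold pvRowB
        apply List.map_congr_left
        intro k hk
        have hkN : k < N := List.mem_range.mp hk
        simp only [hkN, true_and]
      simp only [Prod.mk.injEq]
      constructor
      · rw [PySem.List.pySetD_natCast, pv_set_map_range N b hbN]
        apply List.map_congr_left
        intro i hi
        by_cases hib : i = b
        · subst hib
          rw [if_pos rfl, if_pos (Nat.lt_succ_self i)]
          exact hrow
        · rw [if_neg hib]
          by_cases hlt : i < b
          · rw [if_pos hlt, if_pos (by omega)]
          · rw [if_neg hlt, if_neg (by omega)]
      · have e1 : ((b : Int)) * (N : Int) = ((b * N : Nat) : Int) := by push_cast; ring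
        have e2 : PySem.Int.mod (b : Int) 2 + (N : Int) = ((b % 2 + N : Nat) : Int) := by
          rw [pv_mod2 b]; push_cast; ring
        have e3 : ((b : Int) + 1) * (N : Int) = (((b + 1) * N : Nat) : Int) := by push_cast; ring
        rw [e1, e2, e3, pv_div2, pv_div2, pv_div2, ← pv_cnt_step b N]
        push_cast
        ring

-- ===== VERDICT (by name: the statement is the Claim_ definition above) =====
theorem matriz_e_spec : Claim_equal_matriz_e := by
  intro n _hd
  unfold Spec_matriz_e matriz_e matriz_e_alt
  by_cases hn : n ≤ 0
  · rw [PySem.List.pyRange_one_eq_nil hn]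
    simp
  · rw [not_le] at hn
    obtain ⟨N, hN⟩ : ∃ N : Nat, n = (N : Int) :=
      ⟨n.toNat, (Int.toNat_of_nonneg (le_of_lt hn)).symm⟩
    subst hN
    simp only [Int.toNat_natCast]
    rw [pv_map_const_replicate, PySem.List.length_pyRange_one]
    rw [show ((N : Int) - 0).toNat = N by simp]
    rw [pv_outer_loop N N (le_refl N)]
    rw [PySem.List.pyRange_one 0 (N : Int), List.map_map]
    rw [show ((N : Int) - 0).toNat = N by simp]
    apply List.map_congr_left
    intro i hi
    have hiN : i < N := List.mem_range.mp hi
    rw [if_pos hiN]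
    unfold pvRowB
    simp only [Function.comp_apply, List.map_map, zero_add]
    apply List.map_congr_left
    intro k hk
    simp only [Function.comp_apply]
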